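-- pv_equiv track=rewrite | github.com/cklose2000/document-slides-poc | lib/pdf_extractor.py | _estimate_page_number
-- ===== SOURCE A (Python) =====
-- def _estimate_page_number(text: str, line_number: int) -> int:
--     """Estimate which page a line number corresponds to"""
--     lines = text.split('\n')
--
--     # Look for page separators
--     page_separators = []
--     for i, line in enumerate(lines):
--         if line.strip() == '<<<' or '<<<' in line:
--             page_separators.append(i)
--
--     if not page_separators:
--         return 1  # Single page
--
--     # Find which page the line falls into
--     current_page = 1
--     for separator_line in page_separators:
--         if line_number < separator_line:
--             return current_page
--         current_page += 1
--
--     return current_page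
-- ===== SOURCE B (Python) =====
-- def _estimate_page_number(text: str, line_number: int) -> int:
--     """Estimate which page a line number corresponds to"""
--     # Separator line indices are strictly increasing, so instead of A's linear
--     # early-return walk we locate the page with a binary search (bisect_right):
--     # the page is 1 + the insertion point of line_number among the separators.
--     separators = [i for i, line in enumerate(text.split('\n')) if '<<<' in line]
--     lo, hi = 0, len(separators)
--     while lo < hi:
--         mid = (lo + hi) // 2
--         if line_number < separators[mid]:
--             hi = mid
--         else:
--             lo = mid + 1
--     return 1 + lo
-- ===== Notes on version B (the rewrite author's own statement) =====
-- stated objective: alternative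
-- what changed: A walks the separator-index list linearly with an early return; B instead binary-searches (hand-written bisect_right) the strictly increasing separator list for line_number's insertion point, and drops A's redundant strip-equality test when collecting separators.
import Mathlib
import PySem

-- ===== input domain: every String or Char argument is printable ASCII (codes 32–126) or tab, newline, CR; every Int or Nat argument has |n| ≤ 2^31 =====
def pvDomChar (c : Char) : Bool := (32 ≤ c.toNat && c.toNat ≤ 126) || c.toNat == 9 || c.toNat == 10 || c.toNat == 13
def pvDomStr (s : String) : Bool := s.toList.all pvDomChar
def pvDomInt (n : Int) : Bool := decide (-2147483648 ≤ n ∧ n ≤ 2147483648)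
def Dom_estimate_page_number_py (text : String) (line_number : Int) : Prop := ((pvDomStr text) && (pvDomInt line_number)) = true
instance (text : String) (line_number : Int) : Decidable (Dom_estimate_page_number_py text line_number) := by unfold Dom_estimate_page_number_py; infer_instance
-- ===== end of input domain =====

-- B replaces A's linear early-return walk over the separator-index list by a binary search (bisect_right) over that strictly increasing list; objective: alternative.


-- ===== PORT A =====
-- A's second loop: walk the separator list, early return at the first separator > line_number
def pvWalkSeps (seps : List Int) (line_number : Int) (current_page : Int) : Int :=
  match seps with
  | [] => current_page
  | s :: rest => if line_number < s then current_page else pvWalkSeps rest line_number (current_page + 1)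

def estimate_page_number_py (text : String) (line_number : Int) : Int :=
  let lines := (PySem.Str.split? text "\n").getD []   -- sep "\n" ≠ "", so split? is always `some`
  let page_separators := (PySem.List.enumerate lines 0).foldl
    (fun acc p => if PySem.Str.strip p.2 == "<<<" || PySem.Str.isIn "<<<" p.2 then acc ++ [p.1] else acc) []
  if page_separators = [] then 1
  else pvWalkSeps page_separators line_number 1

-- ===== PORT B =====
-- B's while loop: hand-written bisect_right over the separator list
def pvBisect (seps : List Int) (line_number : Int) (lo hi : Nat) : Nat :=
  if _h : lo < hi then
    let mid := (lo + hi) / 2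
    if line_number < seps.getD mid 0 then pvBisect seps line_number lo mid
    else pvBisect seps line_number (mid + 1) hi
  else lo
termination_by hi - lo
decreasing_by all_goals omega

def estimate_page_number_py_alt (text : String) (line_number : Int) : Int :=
  let separators := (PySem.List.enumerate ((PySem.Str.split? text "\n").getD []) 0).foldl
    (fun acc p => if PySem.Str.isIn "<<<" p.2 then acc ++ [p.1] else acc) []
  1 + (pvBisect separators line_number 0 separators.length : Int)

-- ===== PRECONDITION & SPEC =====
def Spec_estimate_page_number_py (text : String) (line_number : Int) (out : Int) : Prop := out = estimate_page_number_py_alt text line_number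
instance (text : String) (line_number : Int) (out : Int) : Decidable (Spec_estimate_page_number_py text line_number out) := by unfold Spec_estimate_page_number_py; infer_instance

-- ===== CLAIM (what is proved, stated in full; the proofs are below) =====
def Claim_equal_estimate_page_number_py : Prop := ∀ (text : String) (line_number : Int), Dom_estimate_page_number_py text line_number → Spec_estimate_page_number_py text line_number (estimate_page_number_py text line_number)

-- ===== LEMMAS AND PROOFS =====

-- strip(s) is an infix of s
theorem pv_strip_infix (s : List Char) : PySem.Chars.strip s <:+: s := by
  have h1 : PySem.Chars.lstrip s <:+ s := List.dropWhile_suffix _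
  have h2 : PySem.Chars.rstrip (PySem.Chars.lstrip s) <+: PySem.Chars.lstrip s := by
    unfold PySem.Chars.rstrip
    have := List.dropWhile_suffix (l := (PySem.Chars.lstrip s).reverse) (p := PySem.Chars.isspace)
    rw [← List.reverse_prefix] at this
    simpa using this
  exact (h2.isInfix).trans h1.isInfix

-- the strip-equality clause of A's separator test is redundant
theorem pv_cond_eq (l : String) :
    (PySem.Str.strip l == "<<<" || PySem.Str.isIn "<<<" l) = PySem.Str.isIn "<<<" l := by
  cases h : PySem.Str.isIn "<<<" l with
  | true => simp
  | false =>
    simp only [Bool.or_false]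
    rw [beq_eq_false_iff_ne]
    intro hs
    have : ("<<<" : String).toList <:+: l.toList := by
      have := pv_strip_infix l.toList
      rw [← PySem.Str.toList_strip, hs] at this
      exact this
    rw [← PySem.Chars.isIn_iff_infix] at this
    rw [PySem.Str.isIn_eq, this] at h
    exact Bool.true_eq_false.mp h

-- A's walk over a strictly increasing list counts the elements ≤ line_number
theorem pv_walk_eq_count (xs : List Int) (ln c : Int) (h : xs.Pairwise (· < ·)) :
    pvWalkSeps xs ln c = c + (xs.countP (fun s => decide (s ≤ ln)) : Int) := by
  induction xs generalizing c with
  | nil => simp [pvWalkSeps]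
  | cons a rest ih =>
    rw [List.pairwise_cons] at h
    unfold pvWalkSeps
    by_cases hl : ln < a
    · have : rest.countP (fun s => decide (s ≤ ln)) = 0 := by
        rw [List.countP_eq_zero]
        intro x hx
        have := h.1 x hx
        simp only [decide_eq_true_eq]
        omega
      have ha : (decide (a ≤ ln)) = false := by simp; omega
      simp only [if_pos hl, List.countP_cons, this, ha]
      simp
    · rw [if_neg hl, ih _ h.2]
      have : (decide (a ≤ ln)) = true := by simp; omega
      simp only [List.countP_cons, this]
      simp
      omega

-- if everything below index lo is ≤ ln and everything from lo on is > ln, the count of elements ≤ ln is lo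
theorem pv_count_eq_of_cut (xs : List Int) (ln : Int) (lo : Nat) (hlo : lo ≤ xs.length)
    (hbelow : ∀ j (hj : j < xs.length), j < lo → xs[j] ≤ ln)
    (habove : ∀ j (hj : j < xs.length), lo ≤ j → ln < xs[j]) :
    xs.countP (fun s => decide (s ≤ ln)) = lo := by
  rw [show xs.countP (fun s => decide (s ≤ ln))
      = (xs.take lo ++ xs.drop lo).countP (fun s => decide (s ≤ ln)) by rw [List.take_append_drop]]
  rw [List.countP_append]
  have h1 : (xs.take lo).countP (fun s => decide (s ≤ ln)) = (xs.take lo).length := by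
    rw [List.countP_eq_length]
    intro a ha
    obtain ⟨j, hj, rfl⟩ := List.mem_iff_getElem.mp ha
    rw [List.getElem_take]
    have hj' : j < lo := by simp [List.length_take] at hj; omega
    exact decide_eq_true (hbelow j (by simp [List.length_take] at hj; omega) hj')
  have h0 : (xs.drop lo).countP (fun s => decide (s ≤ ln)) = 0 := by
    rw [List.countP_eq_zero]
    intro a ha
    obtain ⟨j, hj, rfl⟩ := List.mem_iff_getElem.mp ha
    rw [List.getElem_drop]
    have := habove (lo + j) (by simp [List.length_drop] at hj; omega) (by omega)
    simp only [decide_eq_true_eq]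
    omega
  rw [h1, h0, List.length_take]
  omega

-- B's binary search on a sorted (Pairwise ≤) list computes the count of elements ≤ line_number
theorem pv_bisect_eq_count (xs : List Int) (ln : Int) (hs : xs.Pairwise (· ≤ ·)) :
    ∀ (n lo hi : Nat), hi - lo = n → lo ≤ hi → hi ≤ xs.length →
    (∀ j (hj : j < xs.length), j < lo → xs[j] ≤ ln) →
    (∀ j (hj : j < xs.length), hi ≤ j → ln < xs[j]) →
    pvBisect xs ln lo hi = xs.countP (fun s => decide (s ≤ ln)) := by
  have hmono : ∀ (i j : Nat) (hi : i < xs.length) (hj : j < xs.length), i ≤ j → xs[i] ≤ xs[j] := by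
    intro i j hi hj hij
    rcases eq_or_lt_of_le hij with rfl | hlt
    · exact le_refl _
    · exact List.pairwise_iff_getElem.mp hs i j hi hj hlt
  intro n
  induction n using Nat.strong_induction_on with
  | _ n ih =>
    intro lo hi hn hle hhi hbelow habove
    by_cases hlt : lo < hi
    · rw [pvBisect, dif_pos hlt]
      have hmid1 : lo ≤ (lo + hi) / 2 := by omega
      have hmid2 : (lo + hi) / 2 < hi := by omega
      have hmlen : (lo + hi) / 2 < xs.length := by omega
      show (if ln < xs.getD ((lo + hi) / 2) 0 then pvBisect xs ln lo ((lo + hi) / 2)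
        else pvBisect xs ln ((lo + hi) / 2 + 1) hi) = List.countP (fun s => decide (s ≤ ln)) xs
      rw [List.getD_eq_getElem xs 0 hmlen]
      by_cases hc : ln < xs[(lo + hi) / 2]
      · rw [if_pos hc]
        exact ih ((lo + hi) / 2 - lo) (by omega) lo ((lo + hi) / 2) rfl (by omega) (by omega)
          hbelow
          (fun j hj hge => lt_of_lt_of_le hc (hmono _ j hmlen hj hge))
      · rw [if_neg hc]
        exact ih (hi - ((lo + hi) / 2 + 1)) (by omega) ((lo + hi) / 2 + 1) hi rfl (by omega) hhi
          (fun j hj hlt' => le_trans (hmono j _ hj hmlen (by omega)) (by omega))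
          habove
    · have heq : lo = hi := by omega
      rw [pvBisect, dif_neg hlt]
      exact (pv_count_eq_of_cut xs ln lo (by omega) hbelow
        (fun j hj hge => habove j hj (by omega))).symm

theorem estimate_page_number_py_eq (text : String) (line_number : Int) :
    estimate_page_number_py text line_number = estimate_page_number_py_alt text line_number := by
  unfold estimate_page_number_py estimate_page_number_py_alt
  simp only [pv_cond_eq]
  set E := PySem.List.enumerate ((PySem.Str.split? text "\n").getD []) 0 with hE
  rw [PySem.List.foldl_append_if (fun p => PySem.Str.isIn "<<<" p.2) (fun p => p.1) E []]
  simp only [List.nil_append]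
  set F := (E.filter (fun p => PySem.Str.isIn "<<<" p.2)).map (fun p => p.1) with hF
  have hpw : F.Pairwise (· < ·) := by
    apply List.Pairwise.map
    · exact fun a b h => h
    · exact (PySem.List.pairwise_lt_enumerate _ _).filter _
  have hbis : pvBisect F line_number 0 F.length = F.countP (fun s => decide (s ≤ line_number)) :=
    pv_bisect_eq_count F line_number (hpw.imp le_of_lt) F.length 0 F.length rfl (by omega) le_rfl
      (fun j hj h => absurd h (Nat.not_lt_zero j)) (fun j hj h => absurd hj (by omega))
  by_cases hnil : F = []
  · rw [if_pos hnil, hbis, hnil]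
    simp
  · rw [if_neg hnil, pv_walk_eq_count F line_number 1 hpw, hbis]

-- ===== VERDICT (by name: the statement is the Claim_ definition above) =====
theorem estimate_page_number_py_spec : Claim_equal_estimate_page_number_py := by
  intro text line_number _
  unfold Spec_estimate_page_number_py
  exact estimate_page_number_py_eq text line_number
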